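-- pv_equiv track=rewrite | github.com/bowber/bai-tap-tin-hoc | HSG 2020/chuyendoi.py | chuyen_doi_2
-- ===== SOURCE A (Python) =====
-- def dec_to_base(num, base:int):
--     ''' Nếu số > 9 sẽ thay bằng kí tự <Space>'''
--     if base < 2:
--         return ""
--     result = ""
--     while num > 0:
--         digit = num % base
--         result += str(digit) if digit < 10 else " "
--         num //= base
--     return result[::-1]
--
-- def count_k(k, string):
--     k_char = str(k)
--     result = 0
--     for i in string[::-1]:
--         if i == k_char:
--             result += 1
--         else:
--             return result
--     return result
--
-- def chuyen_doi_2(n, k):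
--     can_hai_m = int(1e6)
--     max_base = 2
--     max_L = 0
--     for i in range(2, can_hai_m):
--         L = count_k(k, dec_to_base(n, i))
--         if L > max_L:
--             max_L = L
--             max_base = i
--     return (max_base, max_L)
-- ===== SOURCE B (Python) =====
-- def chuyen_doi_2(n, k):
--     # Only bases b with 2 <= b < 10**6, b > k and b | (n - k) can have a trailing
--     # digit equal to k; enumerate divisors of n - k instead of all 10**6 bases.
--     LIMIT = 10 ** 6
--     if n <= 0 or k < 0 or k > 9:
--         return (2, 0)
--     if n == k:
--         return (max(2, k + 1), 1)
--     d = n - k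
--     if d < 0:
--         return (2, 0)
--     divs = set()
--     i = 1
--     while i * i <= d:
--         if d % i == 0:
--             divs.add(i)
--             divs.add(d // i)
--         i += 1
--     best_base, best_L = 2, 0
--     for b in sorted(divs):
--         if b > 1 and b > k and b < LIMIT:
--             L = 0
--             m = n
--             while m > 0 and m % b == k:
--                 L += 1
--                 m = (m - k) // b
--             if L > best_L:
--                 best_base, best_L = b, L
--     return (best_base, best_L)
-- ===== Notes on version B (the rewrite author's own statement) =====
-- stated objective: faster
-- what changed: A scans all bases 2..10^6-1 and converts n to each base to count trailing digits equal to k; B observes that a base b has at least one trailing digit k only if b > k and b divides n - k, so it enumerates the divisors of n - k in O(sqrt(n)) and checks only those candidate bases (handling n == k, n <= 0 and k outside 0..9 directly).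
import Mathlib
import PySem

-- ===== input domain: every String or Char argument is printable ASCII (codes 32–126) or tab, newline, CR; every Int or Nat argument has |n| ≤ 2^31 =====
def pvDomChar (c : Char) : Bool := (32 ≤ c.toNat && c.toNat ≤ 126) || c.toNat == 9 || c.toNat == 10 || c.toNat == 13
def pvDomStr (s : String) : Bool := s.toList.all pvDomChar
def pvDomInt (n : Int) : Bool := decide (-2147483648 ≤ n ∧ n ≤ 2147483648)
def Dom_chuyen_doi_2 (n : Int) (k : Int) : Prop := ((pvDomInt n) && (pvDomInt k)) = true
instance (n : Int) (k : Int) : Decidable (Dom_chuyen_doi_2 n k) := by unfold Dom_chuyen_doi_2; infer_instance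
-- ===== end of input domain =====

-- B replaces A's scan of all 10^6 bases by an enumeration of the divisors of n - k
-- (the only bases with at least one trailing digit k), for speed; same return value.

-- ===== PORT A =====
-- Strings are List Char; 'result[::-1]' is List.reverse (exact: PySem.List.slice?_none_none_neg_one).
-- The while loop of dec_to_base runs only under the enclosing 'if base < 2' guard,
-- so 2 ≤ base is carried as a hypothesis for termination.
def decToBaseLoop (base : Int) (hb : 2 ≤ base) (num : Int) (result : List Char) : List Char :=
  if h : 0 < num then
    let digit := PySem.Int.mod num base
    decToBaseLoop base hb (PySem.Int.floordiv num base)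
      (result ++ (if digit < 10 then PySem.Int.toChars digit else [' ']))
  else result
termination_by num.toNat
decreasing_by
  have h0 : (0:Int) ≤ PySem.Int.floordiv num base :=
    (PySem.Int.le_floordiv_iff_mul_le (by omega)).mpr (by nlinarith)
  have h1 : PySem.Int.floordiv num base < num :=
    (PySem.Int.floordiv_lt_iff_lt_mul (by omega)).mpr (by nlinarith)
  omega

def dec_to_base (num : Int) (base : Int) : List Char :=
  if h : base < 2 then [] else (decToBaseLoop base (by omega) num []).reverse

-- the for-loop of count_k with its early return: aggregates result, stops at first mismatch
def countKLoop (kChar : List Char) (result : Int) : List Char → Int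
  | [] => result
  | i :: rest => if [i] = kChar then countKLoop kChar (result + 1) rest else result

def count_k (k : Int) (string : List Char) : Int :=
  countKLoop (PySem.Int.toChars k) 0 string.reverse

def chuyen_doi_2 (n : Int) (k : Int) : List Int :=
  let canHaiM : Int := 1000000
  let r := (PySem.List.pyRange 2 canHaiM 1).foldl
    (fun (st : Int × Int) i =>
      let L := count_k k (dec_to_base n i)
      if L > st.2 then (i, L) else st)
    (2, 0)
  [r.1, r.2]

-- ===== PORT B =====
-- the 'while i * i <= d' divisor-collecting loop; '1 ≤ i' is a termination guard
-- (the loop starts at i = 1 and only increments i)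
def altDivsLoop (d : Int) (i : Int) (divs : PySem.Set Int) : PySem.Set Int :=
  if h : i * i ≤ d ∧ 1 ≤ i then
    altDivsLoop d (i + 1)
      (if PySem.Int.mod d i = 0
       then PySem.Set.add (PySem.Set.add divs i) (PySem.Int.floordiv d i)
       else divs)
  else divs
termination_by (d + 1 - i).toNat
decreasing_by
  have : i * 1 ≤ i * i := by nlinarith
  omega

-- the 'while m > 0 and m % b == k' trailing-digit counter; '2 ≤ b ∧ 0 ≤ k' are
-- termination guards, true at every call site (b > 1 and 0 ≤ k ≤ 9 are checked before)
def altCount (b : Int) (k : Int) (m : Int) (L : Int) : Int :=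
  if h : (0 < m ∧ PySem.Int.mod m b = k) ∧ (2 ≤ b ∧ 0 ≤ k) then
    altCount b k (PySem.Int.floordiv (m - k) b) (L + 1)
  else L
termination_by m.toNat
decreasing_by
  have h1 : PySem.Int.floordiv (m - k) b < m :=
    (PySem.Int.floordiv_lt_iff_lt_mul (by omega)).mpr (by nlinarith)
  omega

def chuyen_doi_2_alt (n : Int) (k : Int) : List Int :=
  if n ≤ 0 ∨ k < 0 ∨ 9 < k then [2, 0]
  else if n = k then [max 2 (k + 1), 1]
  else if n - k < 0 then [2, 0]
  else
    let divs := altDivsLoop (n - k) 1 PySem.Set.empty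
    let r := (PySem.List.sorted divs (fun x => x)).foldl
      (fun (st : Int × Int) b =>
        if 1 < b ∧ k < b ∧ b < 1000000 then
          let L := altCount b k n 0
          if L > st.2 then (b, L) else st
        else st)
      (2, 0)
    [r.1, r.2]

-- ===== PRECONDITION & SPEC =====
def Spec_chuyen_doi_2 (n : Int) (k : Int) (out : List Int) : Prop := out = chuyen_doi_2_alt n k
instance (n : Int) (k : Int) (out : List Int) : Decidable (Spec_chuyen_doi_2 n k out) := by unfold Spec_chuyen_doi_2; infer_instance

-- ===== CLAIM (what is proved, stated in full; the proofs are below) =====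
def Claim_equal_chuyen_doi_2 : Prop := ∀ (n : Int) (k : Int), Dom_chuyen_doi_2 n k → Spec_chuyen_doi_2 n k (chuyen_doi_2 n k)

-- ===== LEMMAS AND PROOFS =====

-- A's per-base score, and A's loop body as a function of it
def fA (n k b : Int) : Int := count_k k (dec_to_base n b)

def stepF (f : Int → Int) (st : Int × Int) (b : Int) : Int × Int :=
  if f b > st.2 then (b, f b) else st

-- the digit chunks of dec_to_base, least-significant first (result before the final reversal)
def digitsFlat (base : Int) (num : Int) : List Char :=
  if h : 0 < num ∧ 2 ≤ base then
    (if PySem.Int.mod num base < 10 then PySem.Int.toChars (PySem.Int.mod num base) else [' '])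
      ++ digitsFlat base (PySem.Int.floordiv num base)
  else []
termination_by num.toNat
decreasing_by
  have h0 : (0:Int) ≤ PySem.Int.floordiv num base :=
    (PySem.Int.le_floordiv_iff_mul_le (by omega)).mpr (by nlinarith)
  have h1 : PySem.Int.floordiv num base < num :=
    (PySem.Int.floordiv_lt_iff_lt_mul (by omega)).mpr (by nlinarith)
  omega

theorem decToBaseLoop_eq (base : Int) (hb : 2 ≤ base) (num : Int) (result : List Char) :
    decToBaseLoop base hb num result = result ++ digitsFlat base num := by
  rw [decToBaseLoop, digitsFlat]
  by_cases h : 0 < num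
  · rw [dif_pos h, dif_pos ⟨h, hb⟩, decToBaseLoop_eq, List.append_assoc]
  · rw [dif_neg h, dif_neg (by omega), List.append_nil]
termination_by num.toNat
decreasing_by
  have h0 : (0:Int) ≤ PySem.Int.floordiv num base :=
    (PySem.Int.le_floordiv_iff_mul_le (by omega)).mpr (by nlinarith)
  have h1 : PySem.Int.floordiv num base < num :=
    (PySem.Int.floordiv_lt_iff_lt_mul (by omega)).mpr (by nlinarith)
  omega

theorem altCount_acc (b k m L : Int) : altCount b k m L = L + altCount b k m 0 := by
  by_cases h : (0 < m ∧ PySem.Int.mod m b = k) ∧ (2 ≤ b ∧ 0 ≤ k)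
  · conv_lhs => rw [altCount, dif_pos h]
    conv_rhs => rw [altCount, dif_pos h]
    rw [altCount_acc b k (PySem.Int.floordiv (m - k) b) (L + 1),
      altCount_acc b k (PySem.Int.floordiv (m - k) b) (0 + 1)]
    ring
  · conv_lhs => rw [altCount, dif_neg h]
    conv_rhs => rw [altCount, dif_neg h]
    ring
termination_by m.toNat
decreasing_by
  all_goals
    have h1 : PySem.Int.floordiv (m - k) b < m :=
      (PySem.Int.floordiv_lt_iff_lt_mul (by omega)).mpr (by nlinarith)
    omega

theorem altCount_nonneg (b k m : Int) : 0 ≤ altCount b k m 0 := by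
  rw [altCount]
  by_cases h : (0 < m ∧ PySem.Int.mod m b = k) ∧ (2 ≤ b ∧ 0 ≤ k)
  · rw [dif_pos h, altCount_acc]
    have := altCount_nonneg b k (PySem.Int.floordiv (m - k) b)
    omega
  · rw [dif_neg h]
termination_by m.toNat
decreasing_by
  have h1 : PySem.Int.floordiv (m - k) b < m :=
    (PySem.Int.floordiv_lt_iff_lt_mul (by omega)).mpr (by nlinarith)
  omega

theorem altCount_zero (b k m : Int) (h : ¬ (0 < m ∧ PySem.Int.mod m b = k)) :
    altCount b k m 0 = 0 := by
  rw [altCount, dif_neg (by tauto)]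

theorem altCount_pos_iff (b k m : Int) (hb : 2 ≤ b) (hk : 0 ≤ k) :
    0 < altCount b k m 0 ↔ (0 < m ∧ PySem.Int.mod m b = k) := by
  constructor
  · intro hpos
    by_contra hcon
    rw [altCount_zero b k m hcon] at hpos
    omega
  · intro hg
    rw [altCount, dif_pos ⟨hg, hb, hk⟩, altCount_acc]
    have := altCount_nonneg b k (PySem.Int.floordiv (m - k) b)
    omega

-- digits 0..9 render as a single decimal digit character
theorem toChars_digit_spec (d : Int) (h0 : 0 ≤ d) (h9 : d ≤ 9) :
    ∃ c, PySem.Int.toChars d = [c] ∧ 48 ≤ c.toNat ∧ c.toNat ≤ 57 := by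
  interval_cases d
  · exact ⟨'0', by decide, by decide, by decide⟩
  · exact ⟨'1', by decide, by decide, by decide⟩
  · exact ⟨'2', by decide, by decide, by decide⟩
  · exact ⟨'3', by decide, by decide, by decide⟩
  · exact ⟨'4', by decide, by decide, by decide⟩
  · exact ⟨'5', by decide, by decide, by decide⟩
  · exact ⟨'6', by decide, by decide, by decide⟩
  · exact ⟨'7', by decide, by decide, by decide⟩
  · exact ⟨'8', by decide, by decide, by decide⟩
  · exact ⟨'9', by decide, by decide, by decide⟩

theorem toChars_digit_inj (d k : Int) (hd0 : 0 ≤ d) (hd9 : d ≤ 9) (hk0 : 0 ≤ k) (hk9 : k ≤ 9) :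
    PySem.Int.toChars d = PySem.Int.toChars k ↔ d = k := by
  interval_cases d <;> interval_cases k <;> decide

theorem toChars_ne_space (k : Int) (hk0 : 0 ≤ k) (hk9 : k ≤ 9) :
    [' '] ≠ PySem.Int.toChars k := by
  interval_cases k <;> decide

-- for k outside 0..9, str(k) is never a single digit character or a space
theorem toChars_bad (k : Int) (hk : k < 0 ∨ 9 < k) (c : Char)
    (hc : c = ' ' ∨ (48 ≤ c.toNat ∧ c.toNat ≤ 57)) :
    [c] ≠ PySem.Int.toChars k := by
  rcases hk with hk | hk
  · simp only [PySem.Int.toChars, if_pos hk]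
    intro h
    have hcne : c = '-' := by exact (List.cons.injEq _ _ _ _ ▸ h).1
    rcases hc with hc | hc
    · rw [hcne] at hc; exact absurd hc (by decide)
    · rw [hcne] at hc; revert hc; decide
  · have hlen : 2 ≤ (Nat.toDigits 10 k.toNat).length := by
      by_contra hcon
      push_neg at hcon
      have := (Nat.length_toDigits_le_iff (b := 10) (n := k.toNat) (k := 1)
        (by omega) (by omega)).mp (by omega)
      omega
    simp only [PySem.Int.toChars, if_neg (by omega : ¬ k < 0)]
    intro h
    have := congrArg List.length h
    simp at this
    omega

theorem floordiv_shift (n b k : Int) (hb : 0 < b) (h : PySem.Int.mod n b = k) :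
    PySem.Int.floordiv (n - k) b = PySem.Int.floordiv n b := by
  have hq := PySem.Int.floordiv_mul_add_mod n b
  rw [h] at hq
  rw [PySem.Int.floordiv_eq_iff_of_pos hb]
  constructor <;> nlinarith

theorem countK_digitsFlat (b k : Int) (hb : 2 ≤ b) (hk0 : 0 ≤ k) (hk9 : k ≤ 9) (n r : Int) :
    countKLoop (PySem.Int.toChars k) r (digitsFlat b n) = r + altCount b k n 0 := by
  rw [digitsFlat]
  by_cases hn : 0 < n
  · rw [dif_pos ⟨hn, hb⟩]
    have hd0 : 0 ≤ PySem.Int.mod n b := PySem.Int.mod_nonneg n (by omega)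
    by_cases hd10 : PySem.Int.mod n b < 10
    · rw [if_pos hd10]
      obtain ⟨c, hc, _, _⟩ := toChars_digit_spec _ hd0 (by omega)
      rw [hc]
      show countKLoop _ r (c :: digitsFlat b (PySem.Int.floordiv n b)) = _
      by_cases heq : PySem.Int.mod n b = k
      · have hck : [c] = PySem.Int.toChars k := by rw [← hc, heq]
        simp only [countKLoop, if_pos hck]
        rw [countK_digitsFlat b k hb hk0 hk9 (PySem.Int.floordiv n b) (r + 1)]
        conv_rhs => rw [altCount, dif_pos ⟨⟨hn, heq⟩, hb, hk0⟩,
          floordiv_shift n b k (by omega) heq,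
          altCount_acc b k (PySem.Int.floordiv n b) (0 + 1)]
        omega
      · have hck : ¬ ([c] = PySem.Int.toChars k) := by
          rw [← hc]
          intro hcon
          exact heq ((toChars_digit_inj _ k hd0 (by omega) hk0 hk9).mp (by
            simpa using hcon))
        simp only [countKLoop, if_neg hck]
        rw [altCount_zero b k n (by tauto)]
        ring
    · rw [if_neg hd10]
      show countKLoop _ r (' ' :: digitsFlat b (PySem.Int.floordiv n b)) = _
      simp only [countKLoop, if_neg (toChars_ne_space k hk0 hk9)]
      rw [altCount_zero b k n (by intro hcon; omega)]
      ring
  · rw [dif_neg (by omega)]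
    rw [altCount_zero b k n (by omega)]
    simp [countKLoop]
termination_by n.toNat
decreasing_by
  all_goals
    have h0 : (0:Int) ≤ PySem.Int.floordiv n b :=
      (PySem.Int.le_floordiv_iff_mul_le (by omega)).mpr (by nlinarith)
    have h1 : PySem.Int.floordiv n b < n :=
      (PySem.Int.floordiv_lt_iff_lt_mul (by omega)).mpr (by nlinarith)
    omega

theorem countK_digitsFlat_bad (b k n : Int) (hb : 2 ≤ b) (hk : k < 0 ∨ 9 < k) (r : Int) :
    countKLoop (PySem.Int.toChars k) r (digitsFlat b n) = r := by
  rw [digitsFlat]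
  by_cases hn : 0 < n
  · rw [dif_pos ⟨hn, hb⟩]
    have hd0 : 0 ≤ PySem.Int.mod n b := PySem.Int.mod_nonneg n (by omega)
    by_cases hd10 : PySem.Int.mod n b < 10
    · rw [if_pos hd10]
      obtain ⟨c, hc, hcl, hcu⟩ := toChars_digit_spec _ hd0 (by omega)
      rw [hc]
      show countKLoop _ r (c :: digitsFlat b (PySem.Int.floordiv n b)) = _
      simp only [countKLoop, if_neg (toChars_bad k hk c (Or.inr ⟨hcl, hcu⟩))]
    · rw [if_neg hd10]
      show countKLoop _ r (' ' :: digitsFlat b (PySem.Int.floordiv n b)) = _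
      simp only [countKLoop, if_neg (toChars_bad k hk ' ' (Or.inl rfl))]
  · rw [dif_neg (by omega)]
    simp [countKLoop]

theorem fA_eq (n k b : Int) (hb : 2 ≤ b) (hk0 : 0 ≤ k) (hk9 : k ≤ 9) :
    fA n k b = altCount b k n 0 := by
  unfold fA count_k dec_to_base
  rw [dif_neg (by omega), decToBaseLoop_eq, List.nil_append, List.reverse_reverse]
  have := countK_digitsFlat b k hb hk0 hk9 n 0
  omega

theorem fA_bad (n k b : Int) (hb : 2 ≤ b) (hk : k < 0 ∨ 9 < k) : fA n k b = 0 := by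
  unfold fA count_k dec_to_base
  rw [dif_neg (by omega), decToBaseLoop_eq, List.nil_append, List.reverse_reverse]
  exact countK_digitsFlat_bad b k n hb hk 0

theorem mod_eq_iff_dvd (n k b : Int) (hb : 2 ≤ b) (hk0 : 0 ≤ k) :
    PySem.Int.mod n b = k ↔ (b ∣ (n - k) ∧ k < b) := by
  constructor
  · intro h
    refine ⟨⟨PySem.Int.floordiv n b, ?_⟩, ?_⟩
    · have := PySem.Int.floordiv_mul_add_mod n b
      rw [h] at this
      linarith [mul_comm (PySem.Int.floordiv n b) b]
    · rw [← h]; exact PySem.Int.mod_lt n (by omega)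
  · rintro ⟨⟨q, hq⟩, hkb⟩
    rw [PySem.Int.mod_eq_emod_of_pos (by omega)]
    have hn : n = b * q + k := by omega
    rw [hn, add_comm (b * q) k, Int.add_mul_emod_self_left]
    exact Int.emod_eq_of_lt hk0 hkb

-- impossible trailing digit when n < k (0 < n)
theorem mod_ne_of_lt (n k b : Int) (hb : 2 ≤ b) (hn : 0 < n) (hnk : n < k) (hk9 : k ≤ 9) :
    PySem.Int.mod n b ≠ k := by
  intro h
  have hq := PySem.Int.floordiv_mul_add_mod n b
  rw [h] at hq
  have hkb : k < b := h ▸ PySem.Int.mod_lt n (by omega)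
  rcases le_or_gt 0 (PySem.Int.floordiv n b) with h0 | h0
  · nlinarith
  · nlinarith

theorem mem_altDivsLoop (d x : Int) : ∀ (i : Int) (s : PySem.Set Int), 1 ≤ i →
    (x ∈ altDivsLoop d i s ↔
      x ∈ s ∨ ∃ j : Int, i ≤ j ∧ j * j ≤ d ∧ j ∣ d ∧ (x = j ∨ x = PySem.Int.floordiv d j)) := by
  intro i s hi
  rw [altDivsLoop]
  by_cases hc : i * i ≤ d
  · rw [dif_pos ⟨hc, hi⟩, mem_altDivsLoop d x (i + 1) _ (by omega)]
    have hmem : (x ∈ if PySem.Int.mod d i = 0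
        then PySem.Set.add (PySem.Set.add s i) (PySem.Int.floordiv d i) else s) ↔
        (x ∈ s ∨ (i ∣ d ∧ (x = i ∨ x = PySem.Int.floordiv d i))) := by
      by_cases hm : PySem.Int.mod d i = 0
      · rw [if_pos hm, PySem.Set.mem_add, PySem.Set.mem_add]
        have hdvd := (PySem.Int.mod_eq_zero_iff_dvd d i).mp hm
        tauto
      · rw [if_neg hm]
        have : ¬ (i ∣ d) := fun hdvd => hm ((PySem.Int.mod_eq_zero_iff_dvd d i).mpr hdvd)
        tauto
    rw [hmem]
    constructor
    · rintro (((hs | ⟨hdvd, hx⟩) | ⟨j, hj1, hj2, hj3, hj4⟩))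
      · exact Or.inl hs
      · exact Or.inr ⟨i, le_refl i, hc, hdvd, hx⟩
      · exact Or.inr ⟨j, by omega, hj2, hj3, hj4⟩
    · rintro (hs | ⟨j, hj1, hj2, hj3, hj4⟩)
      · exact Or.inl (Or.inl hs)
      · rcases eq_or_lt_of_le hj1 with hji | hji
        · exact Or.inl (Or.inr ⟨hji ▸ hj3, hji ▸ hj4⟩)
        · exact Or.inr ⟨j, by omega, hj2, hj3, hj4⟩
  · rw [dif_neg (by tauto)]
    constructor
    · exact Or.inl
    · rintro (hs | ⟨j, hj1, hj2, _, _⟩)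
      · exact hs
      · exfalso
        have : i * i ≤ j * j := by nlinarith
        omega
termination_by i => (d + 1 - i).toNat
decreasing_by
  have : i * 1 ≤ i * i := by nlinarith
  omega

theorem altDivsLoop_nodup (d : Int) : ∀ (i : Int) (s : PySem.Set Int),
    s.Nodup → (altDivsLoop d i s).Nodup := by
  intro i s hs
  rw [altDivsLoop]
  by_cases hc : i * i ≤ d ∧ 1 ≤ i
  · rw [dif_pos hc]
    apply altDivsLoop_nodup d (i + 1)
    by_cases hm : PySem.Int.mod d i = 0
    · rw [if_pos hm]
      exact PySem.Set.nodup_add _ _ (PySem.Set.nodup_add _ _ hs)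
    · rw [if_neg hm]; exact hs
  · rw [dif_neg hc]; exact hs
termination_by i => (d + 1 - i).toNat
decreasing_by
  have : i * 1 ≤ i * i := by nlinarith
  omega

theorem mem_divs (d x : Int) (hd : 0 < d) :
    x ∈ altDivsLoop d 1 PySem.Set.empty ↔ (0 < x ∧ x ∣ d) := by
  rw [mem_altDivsLoop d x 1 _ (le_refl 1)]
  have hemp : ¬ (x ∈ PySem.Set.empty) := by simp [PySem.Set.empty]
  constructor
  · rintro (hs | ⟨j, hj1, hj2, ⟨c, hc⟩, hx | hx⟩)
    · exact absurd hs hemp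
    · subst hx; exact ⟨by omega, ⟨c, hc⟩⟩
    · subst hx
      have hc0 : 0 < c := by nlinarith
      have : PySem.Int.floordiv d j = c := by
        rw [PySem.Int.floordiv_eq_ediv_of_pos (by omega), hc]
        exact Int.mul_ediv_cancel_left c (by omega)
      rw [this]
      exact ⟨hc0, ⟨j, by rw [hc]; ring⟩⟩
  · rintro ⟨hx, ⟨c, hc⟩⟩
    have hc0 : 0 < c := by nlinarith
    by_cases hxx : x * x ≤ d
    · exact Or.inr ⟨x, by omega, hxx, ⟨c, hc⟩, Or.inl rfl⟩
    · refine Or.inr ⟨c, by omega, by nlinarith, ⟨x, by rw [hc]; ring⟩, Or.inr ?_⟩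
      rw [PySem.Int.floordiv_eq_ediv_of_pos hc0, hc, mul_comm]
      rw [Int.mul_ediv_cancel_left x (by omega)]

theorem foldl_stepF_filter (f : Int → Int) (l : List Int) :
    ∀ st : Int × Int, 0 ≤ st.2 →
      l.foldl (stepF f) st = (l.filter (fun b => decide (0 < f b))).foldl (stepF f) st := by
  induction l with
  | nil => intro st _; rfl
  | cons b t ih =>
    intro st h
    simp only [List.foldl_cons, List.filter_cons]
    by_cases hb : 0 < f b
    · rw [if_pos (by simpa using hb), List.foldl_cons]
      apply ih
      unfold stepF
      split_ifs with hgt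
      · simpa using (le_of_lt hb)
      · exact h
    · have hst : stepF f st b = st := by unfold stepF; rw [if_neg (by omega)]
      rw [if_neg (by simpa using hb), hst]
      exact ih st h

theorem foldl_stepF_const (f : Int → Int) (l : List Int) :
    ∀ x c : Int, (∀ b ∈ l, f b ≤ c) → l.foldl (stepF f) (x, c) = (x, c) := by
  induction l with
  | nil => intro x c _; rfl
  | cons b t ih =>
    intro x c h
    simp only [List.foldl_cons]
    have : stepF f (x, c) b = (x, c) := by
      unfold stepF
      rw [if_neg (by have := h b (by simp); simp; omega)]
    rw [this]
    exact ih x c (fun b hb => h b (by simp [hb]))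

theorem sorted_lt_ext : ∀ (l₁ l₂ : List Int), l₁.Pairwise (· < ·) → l₂.Pairwise (· < ·) →
    (∀ x, x ∈ l₁ ↔ x ∈ l₂) → l₁ = l₂ := by
  intro l₁
  induction l₁ with
  | nil =>
    intro l₂ _ _ h
    cases l₂ with
    | nil => rfl
    | cons b t => exact absurd ((h b).mpr (by simp)) (by simp)
  | cons a t ih =>
    intro l₂ h₁ h₂ hm
    cases l₂ with
    | nil => exact absurd ((hm a).mp (by simp)) (by simp)
    | cons b t₂ =>
      have hab : a = b := by
        rcases List.mem_cons.mp ((hm a).mp (by simp)) with h | h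
        · exact h
        · have hba : b < a := (List.pairwise_cons.mp h₂).1 a h
          rcases List.mem_cons.mp ((hm b).mpr (by simp)) with h' | h'
          · omega
          · have : a < b := (List.pairwise_cons.mp h₁).1 b h'
            omega
      subst hab
      have htail : ∀ x, x ∈ t ↔ x ∈ t₂ := by
        intro x
        constructor
        · intro hx
          have hax : a < x := (List.pairwise_cons.mp h₁).1 x hx
          rcases List.mem_cons.mp ((hm x).mp (by simp [hx])) with h | h
          · omega
          · exact h
        · intro hx
          have hax : a < x := (List.pairwise_cons.mp h₂).1 x hx
          rcases List.mem_cons.mp ((hm x).mpr (by simp [hx])) with h | h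
          · omega
          · exact h
      rw [ih t₂ (List.pairwise_cons.mp h₁).2 (List.pairwise_cons.mp h₂).2 htail]

theorem pairwise_lt_of_le_nodup (l : List Int)
    (h1 : l.Pairwise (fun a b => a ≤ b)) (h2 : l.Nodup) : l.Pairwise (· < ·) :=
  (h1.and h2).imp (fun h => lt_of_le_of_ne h.1 h.2)

-- A's fold restricted to the bases of positive score
def aFold (n k : Int) : Int × Int :=
  ((PySem.List.pyRange 2 1000000 1).filter
    (fun b => decide (0 < fA n k b))).foldl (stepF (fA n k)) (2, 0)

theorem chuyen_doi_2_eq_fold (n k : Int) :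
    chuyen_doi_2 n k = [(aFold n k).1, (aFold n k).2] := by
  unfold chuyen_doi_2 aFold
  rw [← foldl_stepF_filter (fA n k) _ (2, 0) (by norm_num)]
  rfl

theorem main_eq (n k : Int) : chuyen_doi_2 n k = chuyen_doi_2_alt n k := by
  rw [chuyen_doi_2_eq_fold]
  unfold aFold
  by_cases h1 : n ≤ 0 ∨ k < 0 ∨ 9 < k
  · rw [chuyen_doi_2_alt, if_pos h1]
    have hfil : ((PySem.List.pyRange 2 1000000 1).filter
        (fun b => decide (0 < fA n k b))) = [] := by
      apply List.filter_eq_nil_iff.mpr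
      intro b hb
      have hb2 : 2 ≤ b := (PySem.List.mem_pyRange_one.mp hb).1
      rcases h1 with hn | hk
      · rcases le_or_gt k 9 with hk9 | hk9
        · rcases le_or_gt 0 k with hk0 | hk0
          · rw [fA_eq n k b hb2 hk0 hk9, altCount_zero b k n (by omega)]; simp
          · rw [fA_bad n k b hb2 (Or.inl hk0)]; simp
        · rw [fA_bad n k b hb2 (Or.inr hk9)]; simp
      · rw [fA_bad n k b hb2 hk]; simp
    rw [hfil]
    rfl
  · push_neg at h1
    obtain ⟨hn, hk0, hk9⟩ := h1
    by_cases h2 : n = k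
    · -- n = k: every base b > k scores 1, smaller bases score 0
      rw [chuyen_doi_2_alt, if_neg (by push_neg; exact ⟨hn, hk0, hk9⟩), if_pos h2]
      have hm2 : (2:Int) ≤ max 2 (k + 1) := le_max_left _ _
      have hmM : max 2 (k + 1) ≤ 1000000 := by omega
      have hscore : ∀ b : Int, 2 ≤ b → k < b → fA n k b = 1 := by
        intro b hb hkb
        rw [fA_eq n k b hb hk0 hk9]
        have hmod : PySem.Int.mod n b = k := by
          rw [h2, PySem.Int.mod_eq_emod_of_pos (by omega)]
          exact Int.emod_eq_of_lt hk0 hkb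
        rw [altCount, dif_pos ⟨⟨by omega, hmod⟩, hb, hk0⟩]
        have : PySem.Int.floordiv (n - k) b = 0 := by
          rw [h2, sub_self, PySem.Int.floordiv_eq_ediv_of_pos (by omega), Int.zero_ediv]
        rw [this, altCount, dif_neg (by rintro ⟨⟨hcon, _⟩, _⟩; omega)]
        norm_num
      have hzero : ∀ b : Int, 2 ≤ b → b ≤ k → fA n k b = 0 := by
        intro b hb hbk
        rw [fA_eq n k b hb hk0 hk9]
        apply altCount_zero
        rintro ⟨_, hmod⟩
        have := PySem.Int.mod_lt n (show (0:Int) < b by omega)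
        omega
      rw [PySem.List.pyRange_one_append 2 (max 2 (k + 1)) 1000000 hm2 hmM,
        List.filter_append]
      have hf1 : ((PySem.List.pyRange 2 (max 2 (k + 1)) 1).filter
          (fun b => decide (0 < fA n k b))) = [] := by
        apply List.filter_eq_nil_iff.mpr
        intro b hb
        obtain ⟨hbl, hbu⟩ := PySem.List.mem_pyRange_one.mp hb
        rw [hzero b hbl (by omega)]
        simp
      have hf2 : ((PySem.List.pyRange (max 2 (k + 1)) 1000000 1).filter
          (fun b => decide (0 < fA n k b))) =
          PySem.List.pyRange (max 2 (k + 1)) 1000000 1 := by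
        apply List.filter_eq_self.mpr
        intro b hb
        obtain ⟨hbl, hbu⟩ := PySem.List.mem_pyRange_one.mp hb
        rw [hscore b (by omega) (by omega)]
        simp
      rw [hf1, hf2, List.nil_append,
        PySem.List.pyRange_one_cons (show max 2 (k + 1) < 1000000 by omega),
        List.foldl_cons]
      have hstep : stepF (fA n k) (2, 0) (max 2 (k + 1)) = (max 2 (k + 1), 1) := by
        unfold stepF
        rw [hscore (max 2 (k + 1)) hm2 (by omega)]
        norm_num
      rw [hstep, foldl_stepF_const (fA n k) _ _ _ (by
        intro b hb
        obtain ⟨hbl, hbu⟩ := PySem.List.mem_pyRange_one.mp hb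
        rw [hscore b (by omega) (by omega)])]
    · by_cases h3 : n - k < 0
      · rw [chuyen_doi_2_alt, if_neg (by push_neg; exact ⟨hn, hk0, hk9⟩), if_neg h2,
          if_pos h3]
        have hfil : ((PySem.List.pyRange 2 1000000 1).filter
            (fun b => decide (0 < fA n k b))) = [] := by
          apply List.filter_eq_nil_iff.mpr
          intro b hb
          have hb2 : 2 ≤ b := (PySem.List.mem_pyRange_one.mp hb).1
          rw [fA_eq n k b hb2 hk0 hk9, altCount_zero b k n (by
            rintro ⟨_, hmod⟩
            exact mod_ne_of_lt n k b hb2 (by omega) (by omega) hk9 hmod)]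
          simp
        rw [hfil]
        rfl
      · -- main case: d = n - k > 0
        have hd : 0 < n - k := by omega
        rw [chuyen_doi_2_alt, if_neg (by push_neg; exact ⟨hn, hk0, hk9⟩), if_neg h2,
          if_neg h3]
        show _ = [((PySem.List.sorted (altDivsLoop (n - k) 1 PySem.Set.empty)
            (fun x => x)).foldl
            (fun (st : Int × Int) b =>
              if 1 < b ∧ k < b ∧ b < 1000000 then
                stepF (fun b' => altCount b' k n 0) st b
              else st) (2, 0)).1,
          ((PySem.List.sorted (altDivsLoop (n - k) 1 PySem.Set.empty)
            (fun x => x)).foldl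
            (fun (st : Int × Int) b =>
              if 1 < b ∧ k < b ∧ b < 1000000 then
                stepF (fun b' => altCount b' k n 0) st b
              else st) (2, 0)).2]
        rw [PySem.List.foldl_ite_eq_foldl_filter
          (fun b => 1 < b ∧ k < b ∧ b < 1000000)
          (stepF (fun b' => altCount b' k n 0))]
        have hnodup : (altDivsLoop (n - k) 1 PySem.Set.empty).Nodup :=
          altDivsLoop_nodup (n - k) 1 PySem.Set.empty List.nodup_nil
        have hsortnd : (PySem.List.sorted (altDivsLoop (n - k) 1 PySem.Set.empty)
            (fun x => x)).Nodup :=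
          (PySem.List.sorted_perm _ _ _).nodup_iff.mpr hnodup
        have hsortlt : (PySem.List.sorted (altDivsLoop (n - k) 1 PySem.Set.empty)
            (fun x => x)).Pairwise (· < ·) :=
          pairwise_lt_of_le_nodup _ (PySem.List.sorted_pairwise _ _) hsortnd
        have hE : ((PySem.List.pyRange 2 1000000 1).filter
              (fun b => decide (0 < fA n k b))) =
            ((PySem.List.sorted (altDivsLoop (n - k) 1 PySem.Set.empty)
              (fun x => x)).filter
              (fun b => decide (1 < b ∧ k < b ∧ b < 1000000))) := by
          apply sorted_lt_ext
          · exact List.Pairwise.sublist List.filter_sublist (PySem.List.pairwise_lt_pyRange_one 2 1000000)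
          · exact List.Pairwise.sublist List.filter_sublist hsortlt
          · intro x
            simp only [List.mem_filter, PySem.List.mem_pyRange_one, decide_eq_true_eq,
              (PySem.List.sorted_perm _ _ _).mem_iff, mem_divs (n - k) x hd]
            constructor
            · rintro ⟨⟨hx2, hxM⟩, hpos⟩
              have hmod := ((altCount_pos_iff x k n (by omega) hk0).mp
                (by rwa [fA_eq n k x (by omega) hk0 hk9] at hpos)).2
              have hdvd := (mod_eq_iff_dvd n k x (by omega) hk0).mp hmod
              exact ⟨⟨by omega, hdvd.1⟩, by omega, hdvd.2, hxM⟩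
            · rintro ⟨⟨hx0, hdvd⟩, hx1, hkx, hxM⟩
              have hmod := (mod_eq_iff_dvd n k x (by omega) hk0).mpr ⟨hdvd, hkx⟩
              refine ⟨⟨by omega, hxM⟩, ?_⟩
              rw [fA_eq n k x (by omega) hk0 hk9]
              exact (altCount_pos_iff x k n (by omega) hk0).mpr ⟨by omega, hmod⟩
        rw [hE]
        have hcongr : ∀ (st : Int × Int) (b : Int),
            b ∈ ((PySem.List.sorted (altDivsLoop (n - k) 1 PySem.Set.empty)
              (fun x => x)).filter
              (fun b => decide (1 < b ∧ k < b ∧ b < 1000000))) →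
            stepF (fA n k) st b = stepF (fun b' => altCount b' k n 0) st b := by
          intro st b hb
          have hb2 : (1:Int) < b := by
            have := (List.mem_filter.mp hb).2
            simp only [decide_eq_true_eq] at this
            omega
          unfold stepF
          rw [fA_eq n k b (by omega) hk0 hk9]
        rw [PySem.List.foldl_congr_mem _ _ _ _ hcongr]

-- ===== VERDICT (by name: the statement is the Claim_ definition above) =====
theorem chuyen_doi_2_spec : Claim_equal_chuyen_doi_2 := by
  intro n k _
  unfold Spec_chuyen_doi_2
  exact main_eq n k
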